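-- pv_equiv track=rewrite | github.com/lun-ai/sequential-teaching | data/scripts/eval_trace.py | sim_algo_hist
-- ===== SOURCE A (Python) =====
-- def sim_algo_hist(candidates_lists):
--     categories = {"BS": 0, "DS": 0, "IS": 0, "MS": 0, "QS": 0, "Hybrid": 0, "Other": 0}
--
--     for c in candidates_lists:
--         if c != []:
--             if len(list(filter(lambda x: x[0] in ["botup_msort_left_front", "botup_msort_right_front",
--                                                   "botup_msort_left_back",
--                                                   "botup_msort_right_back", "msort_left_front", "msort_left_back",
--                                                   "msort_left_back",
--                                                   "msort_right_back"], c))) == len(c):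
--                 categories["MS"] += 1
--             elif len(list(filter(lambda x: x[0] in ["isort_front", "isort_back"], c))) == len(c):
--                 categories["IS"] += 1
--             elif len(list(filter(lambda x: x[0] in ["qsort_first", "qsort_mid", "qsort_last"], c))) == len(c):
--                 categories["QS"] += 1
--             elif len(list(filter(lambda x: x[0] in ["bubsort_front", "bubsort_back"], c))) == len(c):
--                 categories["BS"] += 1
--             elif len(list(filter(lambda x: x[0] in ["dict_sort_front", "dict_sort_mid", "dict_sort_back"], c))) == len(
--                     c):
--                 categories["DS"] += 1
--             elif len(list(filter(
--                     lambda x: '_'.join(x[0].split('_')[:-1]) in ["is_front_hybrid_ds_front", "is_front_hybrid_ds_mid",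
--                                                                  "is_front_hybrid_ds_back", "is_back_hybrid_ds_front",
--                                                                  "is_back_hybrid_ds_mid", "is_back_hybrid_ds_back"],
--                     c))) == len(c):
--                 categories["Hybrid"] += 1
--             else:
--                 categories["Other"] += 1
--         else:
--             categories["Other"] += 1
--     return categories
-- ===== SOURCE B (Python) =====
-- MS_LABELS = frozenset({"botup_msort_left_front", "botup_msort_right_front", "botup_msort_left_back",
--                        "botup_msort_right_back", "msort_left_front", "msort_left_back", "msort_right_back"})
-- IS_LABELS = frozenset({"isort_front", "isort_back"})
-- QS_LABELS = frozenset({"qsort_first", "qsort_mid", "qsort_last"})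
-- BS_LABELS = frozenset({"bubsort_front", "bubsort_back"})
-- DS_LABELS = frozenset({"dict_sort_front", "dict_sort_mid", "dict_sort_back"})
-- HYBRID_PREFIXES = frozenset({"is_front_hybrid_ds_front", "is_front_hybrid_ds_mid", "is_front_hybrid_ds_back",
--                              "is_back_hybrid_ds_front", "is_back_hybrid_ds_mid", "is_back_hybrid_ds_back"})
--
--
-- def _classify(label):
--     """Category of one candidate label."""
--     if label in MS_LABELS:
--         return "MS"
--     if label in IS_LABELS:
--         return "IS"
--     if label in QS_LABELS:
--         return "QS"
--     if label in BS_LABELS: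
--         return "BS"
--     if label in DS_LABELS:
--         return "DS"
--     if '_'.join(label.split('_')[:-1]) in HYBRID_PREFIXES:
--         return "Hybrid"
--     return "Other"
--
--
-- def sim_algo_hist(candidates_lists):
--     counts = {"BS": 0, "DS": 0, "IS": 0, "MS": 0, "QS": 0, "Hybrid": 0, "Other": 0}
--     for c in candidates_lists:
--         if c:
--             k = _classify(c[0][0])
--             if k != "Other" and all(_classify(x[0]) == k for x in c[1:]):
--                 counts[k] += 1
--                 continue
--         counts["Other"] += 1
--     return counts
-- ===== Notes on version B (the rewrite author's own statement) =====
-- stated objective: simpler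
-- what changed: Replaces A's six full filter passes over each candidate list by a per-element classifier applied once: the head's category is computed and the rest of the list is checked (with short-circuit) to agree, counting 'Other' otherwise.
import Mathlib
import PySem

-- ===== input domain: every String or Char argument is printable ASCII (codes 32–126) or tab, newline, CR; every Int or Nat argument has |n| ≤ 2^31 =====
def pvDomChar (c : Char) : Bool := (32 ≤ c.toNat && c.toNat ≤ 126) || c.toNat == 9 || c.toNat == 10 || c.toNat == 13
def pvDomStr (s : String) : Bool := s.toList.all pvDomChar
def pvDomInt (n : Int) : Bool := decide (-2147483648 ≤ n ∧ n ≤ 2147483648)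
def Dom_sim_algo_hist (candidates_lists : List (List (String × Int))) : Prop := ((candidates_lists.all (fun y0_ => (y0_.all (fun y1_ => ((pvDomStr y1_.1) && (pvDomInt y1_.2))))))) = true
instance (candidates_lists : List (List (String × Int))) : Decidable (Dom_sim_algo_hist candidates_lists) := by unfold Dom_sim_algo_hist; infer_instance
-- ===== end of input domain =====

-- B classifies each element once (one short-circuiting pass per list) instead of A's six full
-- filter passes per list; objective: simpler. Same return value on every input.

-- ===== PORT A =====
-- label lists (shared constants; A's MS list keeps the duplicated "msort_left_back" of the source)
def msL : List String := ["botup_msort_left_front", "botup_msort_right_front", "botup_msort_left_back",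
  "botup_msort_right_back", "msort_left_front", "msort_left_back", "msort_left_back", "msort_right_back"]
def isL : List String := ["isort_front", "isort_back"]
def qsL : List String := ["qsort_first", "qsort_mid", "qsort_last"]
def bsL : List String := ["bubsort_front", "bubsort_back"]
def dsL : List String := ["dict_sort_front", "dict_sort_mid", "dict_sort_back"]
def hyL : List String := ["is_front_hybrid_ds_front", "is_front_hybrid_ds_mid", "is_front_hybrid_ds_back",
  "is_back_hybrid_ds_front", "is_back_hybrid_ds_mid", "is_back_hybrid_ds_back"]

-- '_'.join(s.split('_')[:-1]); split? with the nonempty separator "_" is never none, so .getD [] is exact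
def hybKey (s : String) : String :=
  PySem.Str.join "_" (PySem.List.slice ((PySem.Str.split? s "_").getD []) none (some (-1)))

def catInit : PySem.Dict String Int :=
  PySem.Dict.ofList [("BS", 0), ("DS", 0), ("IS", 0), ("MS", 0), ("QS", 0), ("Hybrid", 0), ("Other", 0)]

-- body of A's for-loop
def simStepA (d : PySem.Dict String Int) (c : List (String × Int)) : PySem.Dict String Int :=
  if c ≠ [] then
    if (c.filter (fun x => msL.contains x.1)).length = c.length then d.modify "MS" 0 (· + 1)
    else if (c.filter (fun x => isL.contains x.1)).length = c.length then d.modify "IS" 0 (· + 1)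
    else if (c.filter (fun x => qsL.contains x.1)).length = c.length then d.modify "QS" 0 (· + 1)
    else if (c.filter (fun x => bsL.contains x.1)).length = c.length then d.modify "BS" 0 (· + 1)
    else if (c.filter (fun x => dsL.contains x.1)).length = c.length then d.modify "DS" 0 (· + 1)
    else if (c.filter (fun x => hyL.contains (hybKey x.1))).length = c.length then d.modify "Hybrid" 0 (· + 1)
    else d.modify "Other" 0 (· + 1)
  else d.modify "Other" 0 (· + 1)

def sim_algo_hist (candidates_lists : List (List (String × Int))) : List (String × Int) :=
  (candidates_lists.foldl simStepA catInit).items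

-- ===== PORT B =====
-- B's _classify: the category of one label
def classify (l : String) : String :=
  if msL.contains l then "MS"
  else if isL.contains l then "IS"
  else if qsL.contains l then "QS"
  else if bsL.contains l then "BS"
  else if dsL.contains l then "DS"
  else if hyL.contains (hybKey l) then "Hybrid"
  else "Other"

-- body of B's for-loop: classify the head, check the rest agrees
def simStepB (d : PySem.Dict String Int) (c : List (String × Int)) : PySem.Dict String Int :=
  match c with
  | [] => d.modify "Other" 0 (· + 1)
  | x :: rest =>
    let k := classify x.1
    if k ≠ "Other" ∧ rest.all (fun y => classify y.1 == k) then d.modify k 0 (· + 1)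
    else d.modify "Other" 0 (· + 1)

def sim_algo_hist_alt (candidates_lists : List (List (String × Int))) : List (String × Int) :=
  (candidates_lists.foldl simStepB catInit).items

-- ===== PRECONDITION & SPEC =====
def Spec_sim_algo_hist (candidates_lists : List (List (String × Int))) (out : List (String × Int)) : Prop := out = sim_algo_hist_alt candidates_lists
instance (candidates_lists : List (List (String × Int))) (out : List (String × Int)) : Decidable (Spec_sim_algo_hist candidates_lists out) := by unfold Spec_sim_algo_hist; infer_instance

-- ===== CLAIM (what is proved, stated in full; the proofs are below) =====
def Claim_equal_sim_algo_hist : Prop := ∀ (candidates_lists : List (List (String × Int))), Dom_sim_algo_hist candidates_lists → Spec_sim_algo_hist candidates_lists (sim_algo_hist candidates_lists)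

-- ===== LEMMAS AND PROOFS =====

-- a label in one of the five fixed lists never has a hybrid prefix
theorem label_not_hyb (l : String)
    (h : msL.contains l = true ∨ isL.contains l = true ∨ qsL.contains l = true ∨
         bsL.contains l = true ∨ dsL.contains l = true) :
    hyL.contains (hybKey l) = false := by
  have hm : l ∈ msL ∨ l ∈ isL ∨ l ∈ qsL ∨ l ∈ bsL ∨ l ∈ dsL := by simpa using h
  rcases hm with hm | hm | hm | hm | hm <;> fin_cases hm <;> decide

-- classify's result determines which label set (if any) the label was found in
theorem classify_mem (l : String) (tag : String) (h : classify l = tag) :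
    (tag = "MS" ∧ msL.contains l = true) ∨ (tag = "IS" ∧ isL.contains l = true) ∨
    (tag = "QS" ∧ qsL.contains l = true) ∨ (tag = "BS" ∧ bsL.contains l = true) ∨
    (tag = "DS" ∧ dsL.contains l = true) ∨ (tag = "Hybrid" ∧ hyL.contains (hybKey l) = true) ∨
    tag = "Other" := by
  unfold classify at h
  by_cases h1 : msL.contains l = true <;> [rw [if_pos h1] at h; rw [if_neg h1] at h]
  · exact Or.inl ⟨h.symm, h1⟩
  by_cases h2 : isL.contains l = true <;> [rw [if_pos h2] at h; rw [if_neg h2] at h]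
  · exact Or.inr (Or.inl ⟨h.symm, h2⟩)
  by_cases h3 : qsL.contains l = true <;> [rw [if_pos h3] at h; rw [if_neg h3] at h]
  · exact Or.inr (Or.inr (Or.inl ⟨h.symm, h3⟩))
  by_cases h4 : bsL.contains l = true <;> [rw [if_pos h4] at h; rw [if_neg h4] at h]
  · exact Or.inr (Or.inr (Or.inr (Or.inl ⟨h.symm, h4⟩)))
  by_cases h5 : dsL.contains l = true <;> [rw [if_pos h5] at h; rw [if_neg h5] at h]
  · exact Or.inr (Or.inr (Or.inr (Or.inr (Or.inl ⟨h.symm, h5⟩))))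
  by_cases h6 : hyL.contains (hybKey l) = true <;> [rw [if_pos h6] at h; rw [if_neg h6] at h]
  · exact Or.inr (Or.inr (Or.inr (Or.inr (Or.inr (Or.inl ⟨h.symm, h6⟩)))))
  · exact Or.inr (Or.inr (Or.inr (Or.inr (Or.inr (Or.inr h.symm)))))

-- classify returns a tag exactly on the tag's label set
theorem classify_eq_MS (l : String) : classify l = "MS" ↔ msL.contains l = true := by
  constructor
  · intro h
    rcases classify_mem l _ h with ⟨_, hc⟩ | ⟨ht, _⟩ | ⟨ht, _⟩ | ⟨ht, _⟩ | ⟨ht, _⟩ | ⟨ht, _⟩ | ht <;>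
      first | exact hc | exact absurd ht (by decide)
  · intro h
    have h' : l ∈ msL := by simpa using h
    fin_cases h' <;> decide

theorem classify_eq_IS (l : String) : classify l = "IS" ↔ isL.contains l = true := by
  constructor
  · intro h
    rcases classify_mem l _ h with ⟨ht, _⟩ | ⟨_, hc⟩ | ⟨ht, _⟩ | ⟨ht, _⟩ | ⟨ht, _⟩ | ⟨ht, _⟩ | ht <;>
      first | exact hc | exact absurd ht (by decide)
  · intro h
    have h' : l ∈ isL := by simpa using h
    fin_cases h' <;> decide

theorem classify_eq_QS (l : String) : classify l = "QS" ↔ qsL.contains l = true := by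
  constructor
  · intro h
    rcases classify_mem l _ h with ⟨ht, _⟩ | ⟨ht, _⟩ | ⟨_, hc⟩ | ⟨ht, _⟩ | ⟨ht, _⟩ | ⟨ht, _⟩ | ht <;>
      first | exact hc | exact absurd ht (by decide)
  · intro h
    have h' : l ∈ qsL := by simpa using h
    fin_cases h' <;> decide

theorem classify_eq_BS (l : String) : classify l = "BS" ↔ bsL.contains l = true := by
  constructor
  · intro h
    rcases classify_mem l _ h with ⟨ht, _⟩ | ⟨ht, _⟩ | ⟨ht, _⟩ | ⟨_, hc⟩ | ⟨ht, _⟩ | ⟨ht, _⟩ | ht <;>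
      first | exact hc | exact absurd ht (by decide)
  · intro h
    have h' : l ∈ bsL := by simpa using h
    fin_cases h' <;> decide

theorem classify_eq_DS (l : String) : classify l = "DS" ↔ dsL.contains l = true := by
  constructor
  · intro h
    rcases classify_mem l _ h with ⟨ht, _⟩ | ⟨ht, _⟩ | ⟨ht, _⟩ | ⟨ht, _⟩ | ⟨_, hc⟩ | ⟨ht, _⟩ | ht <;>
      first | exact hc | exact absurd ht (by decide)
  · intro h
    have h' : l ∈ dsL := by simpa using h
    fin_cases h' <;> decide

theorem classify_eq_Hy (l : String) : classify l = "Hybrid" ↔ hyL.contains (hybKey l) = true := by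
  constructor
  · intro h
    rcases classify_mem l _ h with ⟨ht, _⟩ | ⟨ht, _⟩ | ⟨ht, _⟩ | ⟨ht, _⟩ | ⟨ht, _⟩ | ⟨_, hc⟩ | ht <;>
      first | exact hc | exact absurd ht (by decide)
  · intro h
    have hms : msL.contains l = false := by
      cases hx : msL.contains l
      · rfl
      · rw [label_not_hyb l (Or.inl hx)] at h; exact Bool.noConfusion h
    have his : isL.contains l = false := by
      cases hx : isL.contains l
      · rfl
      · rw [label_not_hyb l (Or.inr (Or.inl hx))] at h; exact Bool.noConfusion h
    have hqs : qsL.contains l = false := by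
      cases hx : qsL.contains l
      · rfl
      · rw [label_not_hyb l (Or.inr (Or.inr (Or.inl hx)))] at h; exact Bool.noConfusion h
    have hbs : bsL.contains l = false := by
      cases hx : bsL.contains l
      · rfl
      · rw [label_not_hyb l (Or.inr (Or.inr (Or.inr (Or.inl hx))))] at h; exact Bool.noConfusion h
    have hds : dsL.contains l = false := by
      cases hx : dsL.contains l
      · rfl
      · rw [label_not_hyb l (Or.inr (Or.inr (Or.inr (Or.inr hx))))] at h; exact Bool.noConfusion h
    unfold classify
    rw [hms, his, hqs, hbs, hds, h]
    simp

theorem classify_cases (l : String) :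
    classify l = "MS" ∨ classify l = "IS" ∨ classify l = "QS" ∨ classify l = "BS" ∨
    classify l = "DS" ∨ classify l = "Hybrid" ∨ classify l = "Other" := by
  rcases classify_mem l (classify l) rfl with ⟨ht, _⟩ | ⟨ht, _⟩ | ⟨ht, _⟩ | ⟨ht, _⟩ | ⟨ht, _⟩ | ⟨ht, _⟩ | ht <;>
    simp [ht]

-- A's "every element's label is in L" test, restated through classify
theorem cond_iff (c : List (String × Int)) (f : String → Bool) (tag : String)
    (h : ∀ l, classify l = tag ↔ f l = true) :
    ((c.filter (fun x => f x.1)).length = c.length) ↔ ∀ y ∈ c, classify y.1 = tag := by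
  rw [List.length_filter_eq_length_iff]
  constructor
  · intro hc y hy; exact (h y.1).mpr (hc y hy)
  · intro hc y hy; exact (h y.1).mp (hc y hy)

-- the per-iteration bodies agree
theorem step_eq (d : PySem.Dict String Int) (c : List (String × Int)) : simStepA d c = simStepB d c := by
  match c with
  | [] => simp [simStepA, simStepB]
  | x :: rest =>
    simp only [simStepA, simStepB, ne_eq, reduceCtorEq, not_false_eq_true, if_true]
    rw [if_congr (cond_iff (x :: rest) _ "MS" classify_eq_MS) rfl
        (if_congr (cond_iff (x :: rest) _ "IS" classify_eq_IS) rfl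
        (if_congr (cond_iff (x :: rest) _ "QS" classify_eq_QS) rfl
        (if_congr (cond_iff (x :: rest) _ "BS" classify_eq_BS) rfl
        (if_congr (cond_iff (x :: rest) _ "DS" classify_eq_DS) rfl
        (if_congr (cond_iff (x :: rest) (fun l => hyL.contains (hybKey l)) "Hybrid" classify_eq_Hy) rfl rfl)))))]
    by_cases hB : rest.all (fun y => classify y.1 == classify x.1) = true
    · have key : ∀ tag : String, (∀ y ∈ x :: rest, classify y.1 = tag) ↔ classify x.1 = tag := by
        intro tag
        constructor
        · intro h; exact h x (by simp)
        · intro h y hy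
          rcases List.mem_cons.mp hy with rfl | hy
          · exact h
          · have := (List.all_eq_true.mp hB) y hy
            rw [beq_iff_eq] at this; rw [this]; exact h
      simp only [key, hB, and_true]
      rcases classify_cases x.1 with hk | hk | hk | hk | hk | hk | hk <;> rw [hk] <;> simp
    · have hno : ∀ tag : String, ¬ (∀ y ∈ x :: rest, classify y.1 = tag) := by
        intro tag hall
        apply hB
        simp only [List.all_eq_true, beq_iff_eq]
        intro y hy
        rw [hall y (by simp [hy]), hall x (by simp)]
      rw [if_neg (hno "MS"), if_neg (hno "IS"), if_neg (hno "QS"), if_neg (hno "BS"),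
          if_neg (hno "DS"), if_neg (hno "Hybrid")]
      simp [hB]

theorem foldl_eq (l : List (List (String × Int))) (d : PySem.Dict String Int) :
    l.foldl simStepA d = l.foldl simStepB d := by
  induction l generalizing d with
  | nil => rfl
  | cons c t ih => simp only [List.foldl_cons, step_eq, ih]

-- ===== VERDICT (by name: the statement is the Claim_ definition above) =====
theorem sim_algo_hist_spec : Claim_equal_sim_algo_hist := by
  intro cls _
  unfold Spec_sim_algo_hist sim_algo_hist sim_algo_hist_alt
  rw [foldl_eq]
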